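-- pv_equiv track=rewrite | github.com/turing-rlgym/Gym | resources_servers/browsecomp_advanced_harness/app.py | _postprocess_search_results
-- ===== SOURCE A (Python) =====
-- def _postprocess_search_results(query: str, results: dict, max_length: int) -> str:
--     blocks = [f"[Search Query]: {query}"]
--     running_len = len(blocks[0])
--
--     for result in results["results"]:
--         title = result.get("title", "")
--         url = result.get("url", "")
--         content = result.get("raw_content") or result.get("content", "")
--         if len(content) > 5000:
--             content = content[:5000] + "\n... [truncated]"
--         entry = f"[Title]: {title}\n[URL]: {url}\n[Content]:\n{content}\n"
--
--         if running_len + len(entry) > max_length: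
--             break
--         blocks.append(entry)
--         running_len += len(entry)
--
--     formatted_results = "\n".join(blocks)
--     return formatted_results
-- ===== SOURCE B (Python) =====
-- def _format_entry(result):
--     content = result.get("raw_content") or result.get("content", "")
--     if len(content) > 5000:
--         content = content[:5000] + "\n... [truncated]"
--     return f"[Title]: {result.get('title', '')}\n[URL]: {result.get('url', '')}\n[Content]:\n{content}\n"
--
--
-- def _postprocess_search_results(query: str, results: dict, max_length: int) -> str:
--     header = f"[Search Query]: {query}"
--     entries = [_format_entry(r) for r in results["results"]]
--     cum = [len(header)]
--     for e in entries:
--         cum.append(cum[-1] + len(e))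
--     k = next((i for i, c in enumerate(cum[1:]) if c > max_length), len(entries))
--     return "\n".join([header] + entries[:k])
-- ===== Notes on version B (the rewrite author's own statement) =====
-- stated objective: alternative
-- what changed: A interleaves formatting and budget-tracking in one loop with break and a growing blocks list; B formats all entries in a comprehension, builds the cumulative length sums, picks the first overflow index with next(...), and joins header plus that prefix slice.
import Mathlib
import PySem

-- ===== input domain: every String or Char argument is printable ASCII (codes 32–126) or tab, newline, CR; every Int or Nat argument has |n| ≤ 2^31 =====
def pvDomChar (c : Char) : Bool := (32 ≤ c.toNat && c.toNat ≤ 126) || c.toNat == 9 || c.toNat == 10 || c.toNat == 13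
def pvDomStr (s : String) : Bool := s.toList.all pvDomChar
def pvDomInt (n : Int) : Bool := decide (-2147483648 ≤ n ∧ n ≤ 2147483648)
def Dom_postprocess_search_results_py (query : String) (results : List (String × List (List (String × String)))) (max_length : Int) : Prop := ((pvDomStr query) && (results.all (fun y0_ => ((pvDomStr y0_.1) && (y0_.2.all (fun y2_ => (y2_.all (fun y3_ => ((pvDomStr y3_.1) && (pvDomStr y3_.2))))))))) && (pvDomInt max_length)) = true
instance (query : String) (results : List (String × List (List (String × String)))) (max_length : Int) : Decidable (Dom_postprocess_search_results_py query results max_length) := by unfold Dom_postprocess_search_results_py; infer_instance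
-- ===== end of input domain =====

-- B re-decomposes A: format every entry first, then pick the kept prefix from cumulative
-- length sums; return-value equivalence is proved on inputs whose dict has a "results" key.

-- ===== PORT A =====
-- the formatted entry for one result dict, exactly as A's loop body computes it
def pvEntryA (result : List (String × String)) : String :=
  let d := PySem.Dict.mk result
  let title := d.getD "title" ""
  let url := d.getD "url" ""
  let content :=
    match d.get? "raw_content" with
    | some s => if s = "" then d.getD "content" "" else s
    | none => d.getD "content" ""
  let content :=
    if PySem.Str.len content > 5000 then
      PySem.Str.slice content none (some 5000) ++ "\n... [truncated]"
    else content
  "[Title]: " ++ title ++ "\n[URL]: " ++ url ++ "\n[Content]:\n" ++ content ++ "\n"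

-- A's for-loop with break: carries blocks and running_len
def pvLoopA (max_length : Int) : List (List (String × String)) → List String → Int → List String
  | [], blocks, _ => blocks
  | result :: rest, blocks, running_len =>
    let entry := pvEntryA result
    if running_len + PySem.Str.len entry > max_length then blocks
    else pvLoopA max_length rest (blocks ++ [entry]) (running_len + PySem.Str.len entry)

def postprocess_search_results_py (query : String) (results : List (String × List (List (String × String)))) (max_length : Int) : String :=
  let header := "[Search Query]: " ++ query
  let rs := ((PySem.Dict.mk results).get? "results").getD []   -- Pre_ guarantees the key exists (KeyError otherwise)
  PySem.Str.join "\n" (pvLoopA max_length rs [header] (PySem.Str.len header))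

-- ===== PORT B =====
-- Source B's _format_entry (same formatting expression)
def pvFmtEntryB (result : List (String × String)) : String :=
  let d := PySem.Dict.mk result
  let content :=
    match d.get? "raw_content" with
    | some s => if s = "" then d.getD "content" "" else s
    | none => d.getD "content" ""
  let content :=
    if PySem.Str.len content > 5000 then
      PySem.Str.slice content none (some 5000) ++ "\n... [truncated]"
    else content
  "[Title]: " ++ d.getD "title" "" ++ "\n[URL]: " ++ d.getD "url" "" ++ "\n[Content]:\n" ++ content ++ "\n"

def postprocess_search_results_py_alt (query : String) (results : List (String × List (List (String × String)))) (max_length : Int) : String :=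
  let header := "[Search Query]: " ++ query
  let entries := (((PySem.Dict.mk results).get? "results").getD []).map pvFmtEntryB
  let cum := entries.foldl (fun c e => c ++ [c.getLast! + PySem.Str.len e]) [PySem.Str.len header]
  let k := (((PySem.List.enumerate cum.tail 0).find? (fun p => p.2 > max_length)).map (·.1)).getD (PySem.List.len entries)
  PySem.Str.join "\n" (header :: PySem.List.slice entries none (some k))

-- ===== PRECONDITION & SPEC =====
-- Pre_ excludes dicts without a "results" key, where the Python A (and B) raises KeyError.
def Pre_postprocess_search_results_py (query : String) (results : List (String × List (List (String × String)))) (max_length : Int) : Prop :=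
  ((PySem.Dict.mk results).get? "results").isSome = true
instance (query : String) (results : List (String × List (List (String × String)))) (max_length : Int) : Decidable (Pre_postprocess_search_results_py query results max_length) := by unfold Pre_postprocess_search_results_py; infer_instance

def pvWitness_postprocess_search_results_py : String × (List (String × List (List (String × String)))) × Int :=
  ("cats", [("results", [[("title", "t1"), ("url", "u1"), ("content", "c1")]])], 200)

def Spec_postprocess_search_results_py (query : String) (results : List (String × List (List (String × String)))) (max_length : Int) (out : String) : Prop := out = postprocess_search_results_py_alt query results max_length
instance (query : String) (results : List (String × List (List (String × String)))) (max_length : Int) (out : String) : Decidable (Spec_postprocess_search_results_py query results max_length out) := by unfold Spec_postprocess_search_results_py; infer_instance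

-- ===== CLAIM (what is proved, stated in full; the proofs are below) =====
def Claim_equal_postprocess_search_results_py : Prop := ∀ (query : String) (results : List (String × List (List (String × String)))) (max_length : Int), Dom_postprocess_search_results_py query results max_length → Pre_postprocess_search_results_py query results max_length → Spec_postprocess_search_results_py query results max_length (postprocess_search_results_py query results max_length)

-- ===== LEMMAS AND PROOFS =====

-- proof-side reference: the prefix of entries kept under the budget
def pvKeep (max_length : Int) : List String → Int → List String
  | [], _ => []
  | e :: es, acc =>
    if acc + PySem.Str.len e > max_length then []
    else e :: pvKeep max_length es (acc + PySem.Str.len e)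

-- proof-side: number of kept entries
def pvKOf (max_length : Int) : List String → Int → Nat
  | [], _ => 0
  | e :: es, acc =>
    if acc + PySem.Str.len e > max_length then 0
    else 1 + pvKOf max_length es (acc + PySem.Str.len e)

-- proof-side: partial sums starting from acc
def pvSums : List String → Int → List Int
  | [], _ => []
  | e :: es, acc => (acc + PySem.Str.len e) :: pvSums es (acc + PySem.Str.len e)

theorem pvEntryA_eq_fmtB (r : List (String × String)) : pvEntryA r = pvFmtEntryB r := rfl

theorem pvLoopA_eq_keep (max_length : Int) (rs : List (List (String × String)))
    (blocks : List String) (acc : Int) :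
    pvLoopA max_length rs blocks acc
      = blocks ++ pvKeep max_length (rs.map pvFmtEntryB) acc := by
  induction rs generalizing blocks acc with
  | nil => simp [pvLoopA, pvKeep]
  | cons r rest ih =>
    simp only [pvLoopA, pvKeep, List.map_cons, pvEntryA_eq_fmtB]
    split_ifs with h
    · simp
    · rw [ih]; simp

theorem pvKeep_eq_take (max_length : Int) (es : List String) (acc : Int) :
    pvKeep max_length es acc = es.take (pvKOf max_length es acc) := by
  induction es generalizing acc with
  | nil => simp [pvKeep, pvKOf]
  | cons e es ih =>
    simp only [pvKeep, pvKOf]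
    split_ifs with h
    · simp
    · rw [ih]; simp [Nat.one_add]

theorem pvFoldl_cum (es : List String) (c : List Int) (a : Int) (hc : c.getLast! = a) :
    es.foldl (fun c e => c ++ [c.getLast! + PySem.Str.len e]) c = c ++ pvSums es a := by
  induction es generalizing c a with
  | nil => simp [pvSums]
  | cons e es ih =>
    simp only [List.foldl_cons, pvSums, hc]
    rw [ih (c ++ [a + PySem.Str.len e]) (a + PySem.Str.len e) (by simp)]
    simp

theorem pvFind_sums (max_length : Int) (es : List String) (a : Int) (s : Int) :
    ((((PySem.List.enumerate (pvSums es a) s).find? (fun p => p.2 > max_length)).map (·.1)).getD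
        (s + es.length))
      = s + pvKOf max_length es a := by
  induction es generalizing a s with
  | nil => simp [pvSums, pvKOf]
  | cons e es ih =>
    simp only [pvSums, pvKOf, PySem.List.enumerate]
    by_cases h : a + PySem.Str.len e > max_length
    · rw [List.find?_cons_of_pos (by exact decide_eq_true h), if_pos h]
      simp
    · rw [List.find?_cons_of_neg (by simpa using h), if_neg h]
      have h2 := ih (a + PySem.Str.len e) (s + 1)
      rw [show (s + (((e :: es).length : Nat) : Int)) = (s + 1) + ((es.length : Nat) : Int) from by
        simp only [List.length_cons]; push_cast; ring]
      rw [h2]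
      push_cast
      ring

theorem pvSlice_take (es : List String) (k : Nat) :
    PySem.List.slice es none (some (k : Int)) = es.take k := PySem.List.slice_to_natCast es k

-- ===== VERDICT (by name: the statement is the Claim_ definition above) =====
theorem postprocess_search_results_py_spec : Claim_equal_postprocess_search_results_py := by
  intro query results max_length _ _
  unfold Spec_postprocess_search_results_py postprocess_search_results_py postprocess_search_results_py_alt
  simp only []
  set header := "[Search Query]: " ++ query with hh
  set rs := ((PySem.Dict.mk results).get? "results").getD [] with hrs
  set entries := rs.map pvFmtEntryB with he
  rw [pvLoopA_eq_keep, pvKeep_eq_take]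
  rw [pvFoldl_cum entries [PySem.Str.len header] (PySem.Str.len header) (by simp)]
  have htail : ([PySem.Str.len header] ++ pvSums entries (PySem.Str.len header)).tail
      = pvSums entries (PySem.Str.len header) := by simp
  rw [htail]
  have hfind := pvFind_sums max_length entries (PySem.Str.len header) 0
  simp only [zero_add] at hfind
  have hlen : PySem.List.len entries = (entries.length : Int) := PySem.List.len_eq entries
  rw [hlen, hfind, pvSlice_take]
  rfl
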